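-- pv_equiv track=rewrite | github.com/Ashiq-am/Path-of-Python | 3.Data Types/Arrays Set 1 and Set 2/Prefix/Find the Prefix-MEX Array for given Array/Find the Prefix-MEX Array for given Array.py | Prefix_Mex
-- ===== SOURCE A (Python) =====
-- def Prefix_Mex(A, n):
-- 	# Maximum element in vector A
-- 	mx_element = max(A)
-- 	# Store all number from 0
-- 	# to maximum element + 1 in a set
-- 	s = {}
-- 	for i in range(mx_element+2):
-- 		s[i] = True
--
-- 	# Loop to calculate Mex for each index
-- 	B = [0]*n
-- 	for i in range(n):
-- 		# Checking if A[i] is present in set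
-- 		# If present then we erase that element
-- 		if A[i] in s.keys():
-- 			del s[A[i]]
-- 		# Store the first element of set
-- 		# in vector B as Mex of prefix vector
-- 		B[i] = int(list(s.keys())[0])
-- 		# Return the list B
-- 	return B
-- ===== SOURCE B (Python) =====
-- def Prefix_Mex(A, n):
--     # One pass with a monotone MEX pointer over a hash set of seen values.
--     seen = set()
--     mex = 0
--     res = []
--     for i in range(n):
--         seen.add(A[i])
--         while mex in seen:
--             mex += 1
--         res.append(mex)
--     return res
-- ===== Notes on version B (the rewrite author's own statement) =====
-- stated objective: faster
-- what changed: Replaces the dict of all values 0..max(A)+1 with per-step deletion and re-listing of its keys by a single pass that keeps a set of seen values and a monotone MEX pointer that only ever moves forward.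
import Mathlib
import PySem

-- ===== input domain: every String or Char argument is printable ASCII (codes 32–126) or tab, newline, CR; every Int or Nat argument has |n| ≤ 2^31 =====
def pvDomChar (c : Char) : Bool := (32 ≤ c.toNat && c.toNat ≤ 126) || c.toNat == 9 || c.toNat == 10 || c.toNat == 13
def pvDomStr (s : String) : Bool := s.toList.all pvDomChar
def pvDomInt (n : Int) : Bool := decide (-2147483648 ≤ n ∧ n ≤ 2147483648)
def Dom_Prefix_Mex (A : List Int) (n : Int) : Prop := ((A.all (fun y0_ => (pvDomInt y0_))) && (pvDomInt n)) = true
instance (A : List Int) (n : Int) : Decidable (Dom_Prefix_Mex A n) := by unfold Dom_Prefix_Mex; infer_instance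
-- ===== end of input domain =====

-- B replaces A's dict of all values 0..max(A)+1 with per-step key re-listing by a single
-- pass keeping a seen-set and a monotone MEX pointer (objective: faster).

-- ===== PORT A =====
-- Literal port of A: mx = max(A); dict s of keys 0..mx+1; B = [0]*n; for i in range(n):
-- delete A[i] from s if present, B[i] = first key of s.
def Prefix_Mex (A : List Int) (n : Int) : List Int :=
  match PySem.List.max? A (fun x => x) with
  | none => []   -- Python: max([]) raises ValueError (excluded by Pre_)
  | some mx =>
    -- for i in range(mx+2): s[i] = True.  Every key of this loop is fresh (range keys are
    -- distinct and the dict starts empty), so each dict insert appends; the same loop is run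
    -- as a right fold with cons, giving the identical items list in linear time (exact here:
    -- PySem.Dict.items_foldl_insert_fresh, proved as aState_init_items below).
    let s0 : PySem.Dict Int Bool :=
      PySem.Dict.mk ((PySem.List.pyRange 0 (mx + 2) 1).foldr (fun i items => (i, true) :: items) [])
    let B0 : List Int := List.replicate n.toNat 0
    let st :=
      (PySem.List.pyRange 0 n 1).foldl
        (fun (st : PySem.Dict Int Bool × List Int) i =>
          let a := PySem.List.pyGetD A i 0          -- A[i]; IndexError excluded by Pre_
          let s := if st.1.contains a then st.1.erase a else st.1
          let b := PySem.List.pyGetD s.keys 0 0     -- list(s.keys())[0]; IndexError excluded by Pre_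
          (s, PySem.List.pySetD st.2 i b))
        (s0, B0)
    st.2

-- ===== PORT B =====
-- 'while mex in seen: mex += 1'; fuel seen.length + 1 always suffices (pmexFind_spec below), so this is exact.
def pmexFind (seen : PySem.Set Int) : Nat → Int → Int
  | 0, m => m
  | fuel + 1, m => if seen.contains m then pmexFind seen fuel (m + 1) else m

def Prefix_Mex_alt (A : List Int) (n : Int) : List Int :=
  let st :=
    (PySem.List.pyRange 0 n 1).foldl
      (fun (st : PySem.Set Int × Int × List Int) i =>
        let seen := st.1.add (PySem.List.pyGetD A i 0)
        let mex := pmexFind seen (seen.length + 1) st.2.1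
        (seen, mex, st.2.2 ++ [mex]))
      (PySem.Set.empty, 0, [])
  st.2.2

-- ===== PRECONDITION & SPEC =====
-- Pre_ excludes exactly the inputs where A raises: max([]) is ValueError; A[i] for i ≥ len(A)
-- is IndexError; and if the loop runs (0 < n) while every element is below -1, the dict is
-- empty and list(s.keys())[0] is IndexError.
def Pre_Prefix_Mex (A : List Int) (n : Int) : Prop :=
  A ≠ [] ∧ n ≤ (A.length : Int) ∧ (0 < n → ∃ x ∈ A, -1 ≤ x)
instance (A : List Int) (n : Int) : Decidable (Pre_Prefix_Mex A n) := by
  unfold Pre_Prefix_Mex; infer_instance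
def pvWitness_Prefix_Mex : List Int × Int := ([1, 0, 2, 4], 4)

def Spec_Prefix_Mex (A : List Int) (n : Int) (out : List Int) : Prop := out = Prefix_Mex_alt A n
instance (A : List Int) (n : Int) (out : List Int) : Decidable (Spec_Prefix_Mex A n out) := by
  unfold Spec_Prefix_Mex; infer_instance

-- ===== CLAIM (what is proved, stated in full; the proofs are below) =====
def Claim_equal_Prefix_Mex : Prop := ∀ (A : List Int) (n : Int), Dom_Prefix_Mex A n → Pre_Prefix_Mex A n → Spec_Prefix_Mex A n (Prefix_Mex A n)

-- ===== LEMMAS AND PROOFS =====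

-- m is the least nonnegative integer not occurring in P
def IsMex (P : List Int) (m : Int) : Prop :=
  0 ≤ m ∧ m ∉ P ∧ ∀ j : Int, 0 ≤ j → j < m → j ∈ P


def aState (A : List Int) (mx : Int) (n : Int) (k : Nat) : PySem.Dict Int Bool × List Int :=
  (List.map (fun j => Int.ofNat j) (List.range k)).foldl
    (fun (st : PySem.Dict Int Bool × List Int) i =>
      let a := PySem.List.pyGetD A i 0
      let s := if st.1.contains a then st.1.erase a else st.1
      let b := PySem.List.pyGetD s.keys 0 0
      (s, PySem.List.pySetD st.2 i b))
    (PySem.Dict.mk ((PySem.List.pyRange 0 (mx + 2) 1).foldr (fun i items => (i, true) :: items) []),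
     List.replicate n.toNat 0)

theorem Prefix_Mex_eq_aState (A : List Int) (n mx : Int)
    (h : PySem.List.max? A (fun x => x) = some mx) :
    Prefix_Mex A n = (aState A mx n n.toNat).2 := by
  rw [Prefix_Mex, h, aState, PySem.List.pyRange_one]
  norm_num

def bState (A : List Int) (n : Int) (k : Nat) : PySem.Set Int × Int × List Int :=
  (List.map (fun j => Int.ofNat j) (List.range k)).foldl
    (fun (st : PySem.Set Int × Int × List Int) i =>
      let seen := st.1.add (PySem.List.pyGetD A i 0)
      let mex := pmexFind seen (seen.length + 1) st.2.1
      (seen, mex, st.2.2 ++ [mex]))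
    (PySem.Set.empty, 0, [])

theorem alt_eq_bState (A : List Int) (n : Int) :
    Prefix_Mex_alt A n = (bState A n n.toNat).2.2 := by
  rw [Prefix_Mex_alt, bState, PySem.List.pyRange_one]
  norm_num

theorem aState_succ (A : List Int) (mx n : Int) (k : Nat) :
    aState A mx n (k + 1) =
      (let st := aState A mx n k
       let a := PySem.List.pyGetD A (k : Int) 0
       let s := if st.1.contains a then st.1.erase a else st.1
       let b := PySem.List.pyGetD s.keys 0 0
       (s, PySem.List.pySetD st.2 (k : Int) b)) := by
  rw [aState, aState, List.range_succ, List.map_append, List.foldl_append]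
  rfl

theorem bState_succ (A : List Int) (n : Int) (k : Nat) :
    bState A n (k + 1) =
      (let st := bState A n k
       let seen := st.1.add (PySem.List.pyGetD A (k : Int) 0)
       let mex := pmexFind seen (seen.length + 1) st.2.1
       (seen, mex, st.2.2 ++ [mex])) := by
  rw [bState, bState, List.range_succ, List.map_append, List.foldl_append]
  rfl

theorem set_contains_eq (s : PySem.Set Int) (m : Int) :
    PySem.Set.contains s m = decide (m ∈ s) := by
  simp [PySem.Set.contains, List.contains_eq_mem]

theorem filter_succ_length (s : List Int) (m : Int) (hm : m ∈ s) :
    (s.filter (fun x => decide (m + 1 ≤ x))).length < (s.filter (fun x => decide (m ≤ x))).length := by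
  induction s with
  | nil => cases hm
  | cons a t ih =>
    have hle : ((t.filter (fun x => decide (m + 1 ≤ x))).length ≤ (t.filter (fun x => decide (m ≤ x))).length) :=
      (List.monotone_filter_right t (fun x hx => by
        rw [decide_eq_true_eq] at hx ⊢; omega)).length_le
    rw [List.filter_cons, List.filter_cons]
    by_cases ha : a = m
    · subst ha
      rw [if_neg (by rw [decide_eq_true_eq]; omega), if_pos (by rw [decide_eq_true_eq])]
      rw [List.length_cons]
      omega
    · have hmt : m ∈ t := by
        rcases List.mem_cons.mp hm with h | h
        · exact absurd h.symm ha
        · exact h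
      have hih := ih hmt
      by_cases h1 : m + 1 ≤ a
      · rw [if_pos (by rw [decide_eq_true_eq]; omega), if_pos (by rw [decide_eq_true_eq]; omega)]
        rw [List.length_cons, List.length_cons]
        omega
      · rw [if_neg (by rw [decide_eq_true_eq]; omega), if_neg (by rw [decide_eq_true_eq]; omega)]
        exact hih

theorem pmexFind_spec (s : List Int) :
    ∀ (fuel : Nat) (m : Int), (s.filter (fun x => decide (m ≤ x))).length < fuel →
      pmexFind s fuel m ∉ s ∧ m ≤ pmexFind s fuel m ∧
        ∀ j : Int, m ≤ j → j < pmexFind s fuel m → j ∈ s := by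
  intro fuel
  induction fuel with
  | zero => intro m h; omega
  | succ fuel ih =>
    intro m h
    by_cases hm : m ∈ s
    · have hlt := filter_succ_length s m hm
      rcases ih (m + 1) (by omega) with ⟨h1, h2, h3⟩
      rw [pmexFind, set_contains_eq, if_pos (by simpa using hm)]
      refine ⟨h1, by omega, fun j hj1 hj2 => ?_⟩
      by_cases hjm : j = m
      · subst hjm; exact hm
      · exact h3 j (by omega) hj2
    · rw [pmexFind, set_contains_eq, if_neg (by simpa using hm)]
      exact ⟨hm, le_refl _, fun j hj1 hj2 => by omega⟩

theorem take_succ_eq (A : List Int) (k : Nat) (hk : k < A.length) :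
    A.take (k + 1) = A.take k ++ [A[k]] := by
  rw [List.take_add_one, List.getElem?_eq_getElem hk]
  rfl

theorem bState_inv (A : List Int) (n : Int) (hlen : n ≤ (A.length : Int)) :
    ∀ k : Nat, (k : Int) ≤ n →
      (bState A n k).1 = PySem.Set.ofList (A.take k) ∧
      IsMex (A.take k) (bState A n k).2.1 ∧
      (bState A n k).2.2.length = k ∧
      ∀ j : Nat, j < k → IsMex (A.take (j + 1)) ((bState A n k).2.2.getD j 0) := by
  intro k
  induction k with
  | zero =>
    intro _
    simp only [bState, List.range_zero, List.map_nil, List.foldl_nil, List.take_zero]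
    exact ⟨rfl, ⟨le_refl 0, by simp, fun j h1 h2 => by omega⟩, rfl, fun j hj => by omega⟩
  | succ k ih =>
    intro hk1
    have hkA : k < A.length := by omega
    rcases ih (by omega) with ⟨hseen, ⟨hm0, hmn, hml⟩, hlen2, hmexs⟩
    rw [bState_succ]
    have hget : PySem.List.pyGetD A (k : Int) 0 = A[k] := by
      rw [PySem.List.pyGetD_eq_getElem A 0 (by omega) (by omega)]
      simp
    have htake := take_succ_eq A k hkA
    have hmem_succ : ∀ x : Int, x ∈ A.take (k + 1) ↔ x ∈ A.take k ∨ x = A[k] := by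
      intro x; rw [htake]; simp only [List.mem_append, List.mem_singleton]
    -- the new seen set
    have hseen' : (bState A n k).1.add (PySem.List.pyGetD A (k : Int) 0)
        = PySem.Set.ofList (A.take (k + 1)) := by
      rw [hget, hseen, htake, PySem.Set.ofList_eq_foldl, PySem.Set.ofList_eq_foldl,
        List.foldl_append]
      rfl
    simp only [hseen']
    set S' : PySem.Set Int := PySem.Set.ofList (A.take (k + 1)) with hS'
    set m := (bState A n k).2.1 with hm
    have hfuel : (S'.filter (fun x => decide (m ≤ x))).length < S'.length + 1 :=
      Nat.lt_succ_of_le (List.length_filter_le _ _)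
    rcases pmexFind_spec S' (S'.length + 1) m hfuel with ⟨r1, r2, r3⟩
    set r := pmexFind S' (S'.length + 1) m with hr
    have hrmex : IsMex (A.take (k + 1)) r := by
      refine ⟨by omega, fun hmem => r1 ((PySem.Set.mem_ofList _ _).mpr hmem), fun j hj1 hj2 => ?_⟩
      by_cases hjm : j < m
      · rw [htake]
        exact List.mem_append_left _ (hml j hj1 hjm)
      · exact (PySem.Set.mem_ofList _ _).mp (r3 j (by omega) hj2)
    refine ⟨by trivial, hrmex, by simp [hlen2], fun j hj => ?_⟩
    by_cases hjk : j < k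
    · have : ((bState A n k).2.2 ++ [r]).getD j 0 = (bState A n k).2.2.getD j 0 := by
        rw [List.getD_eq_getElem?_getD, List.getD_eq_getElem?_getD,
          List.getElem?_append_left (by omega)]
      rw [this]
      exact hmexs j hjk
    · obtain rfl : j = k := by omega
      have hcat := List.getElem?_concat_length (l := (bState A n j).2.2) (a := r)
      rw [hlen2] at hcat
      have : ((bState A n j).2.2 ++ [r]).getD j 0 = r := by
        rw [List.getD_eq_getElem?_getD, hcat]
        rfl
      rw [this]
      exact hrmex

-- the cons-built dict in the ports IS the Python insert loop: all keys are fresh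
theorem aState_init_items (mx : Int) :
    (PySem.List.pyRange 0 (mx + 2) 1).foldr
        (fun i items => (i, true) :: items) ([] : List (Int × Bool))
      = ((PySem.List.pyRange 0 (mx + 2) 1).foldl
          (fun (s : PySem.Dict Int Bool) i => s.insert i true) PySem.Dict.empty).items := by
  rw [PySem.Dict.items_foldl_insert_fresh (PySem.List.pyRange 0 (mx + 2) 1)
    (fun a => a) (fun _ => true) PySem.Dict.empty
    (fun a _ => PySem.Dict.contains_empty a)
    (by simpa using PySem.List.nodup_pyRange_one 0 (mx + 2))]
  rw [← List.map_eq_foldr]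
  rfl

theorem aState_succ_fst (A : List Int) (mx n : Int) (k : Nat) :
    (aState A mx n (k + 1)).1 =
      (if (aState A mx n k).1.contains (PySem.List.pyGetD A (k : Int) 0)
        then (aState A mx n k).1.erase (PySem.List.pyGetD A (k : Int) 0)
        else (aState A mx n k).1) := by
  rw [aState_succ]

theorem aState_succ_snd (A : List Int) (mx n : Int) (k : Nat) :
    (aState A mx n (k + 1)).2 =
      PySem.List.pySetD (aState A mx n k).2 (k : Int)
        (PySem.List.pyGetD
          (if (aState A mx n k).1.contains (PySem.List.pyGetD A (k : Int) 0)
            then (aState A mx n k).1.erase (PySem.List.pyGetD A (k : Int) 0)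
            else (aState A mx n k).1).keys 0 0) := by
  rw [aState_succ]

theorem aState_inv (A : List Int) (mx n : Int) (hmx : -1 ≤ mx)
    (hmax : ∀ x ∈ A, x ≤ mx) (hlen : n ≤ (A.length : Int)) :
    ∀ k : Nat, (k : Int) ≤ n →
      (aState A mx n k).1.items
        = ((PySem.List.pyRange 0 (mx + 2) 1).filter
            (fun x => decide (x ∉ A.take k))).map (fun x => (x, true)) ∧
      (aState A mx n k).2.length = n.toNat ∧
      ∀ j : Nat, j < k → IsMex (A.take (j + 1)) ((aState A mx n k).2.getD j 0) := by
  intro k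
  induction k with
  | zero =>
    intro _
    simp only [aState, List.range_zero, List.map_nil, List.foldl_nil, List.take_zero]
    refine ⟨?_, List.length_replicate, fun j hj => by omega⟩
    rw [aState_init_items, PySem.Dict.items_foldl_insert_fresh (PySem.List.pyRange 0 (mx + 2) 1)
      (fun a => a) (fun _ => true) PySem.Dict.empty
      (fun a _ => PySem.Dict.contains_empty a)
      (by simpa using PySem.List.nodup_pyRange_one 0 (mx + 2))]
    conv_rhs => rw [List.filter_eq_self.mpr (fun x _ => by simp)]
    rfl
  | succ k ih =>
    intro hk1
    have hkA : k < A.length := by omega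
    rcases ih (by omega) with ⟨hitems, hlen2, hmexs⟩
    have hget : PySem.List.pyGetD A (k : Int) 0 = A[k] := by
      rw [PySem.List.pyGetD_eq_getElem A 0 (by omega) (by omega)]
      simp
    have htake := take_succ_eq A k hkA
    have hmem_succ : ∀ x : Int, x ∈ A.take (k + 1) ↔ x ∈ A.take k ∨ x = A[k] := by
      intro x; rw [htake]; simp only [List.mem_append, List.mem_singleton]
    have hkeys : (aState A mx n k).1.keys
        = (PySem.List.pyRange 0 (mx + 2) 1).filter (fun x => decide (x ∉ A.take k)) := by
      simp only [PySem.Dict.keys, hitems, List.map_map]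
      simp [Function.comp_def]
    have hcont : (aState A mx n k).1.contains A[k]
        = decide (A[k] ∈ (PySem.List.pyRange 0 (mx + 2) 1).filter (fun x => decide (x ∉ A.take k))) := by
      rw [PySem.Dict.contains_eq_decide_mem_keys, hkeys]
    have hitems' : (aState A mx n (k + 1)).1.items
        = ((PySem.List.pyRange 0 (mx + 2) 1).filter
            (fun x => decide (x ∉ A.take (k + 1)))).map (fun x => (x, true)) := by
      rw [aState_succ_fst, hget]
      by_cases hc : A[k] ∈ (PySem.List.pyRange 0 (mx + 2) 1).filter (fun x => decide (x ∉ A.take k))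
      · rw [if_pos (by rw [hcont]; simpa using hc)]
        show ((aState A mx n k).1.items.filter _) = _
        rw [hitems, List.filter_map, List.filter_filter]
        congr 1
        apply List.filter_congr
        intro x hx
        by_cases hxa : x = A[k]
        · subst hxa
          have hnot : A[k] ∉ A.take k := by simpa using (List.mem_filter.mp hc).2
          simp [Function.comp_def, hmem_succ]
        · simp [Function.comp_def, hmem_succ, hxa]
      · rw [if_neg (by rw [hcont]; simpa using hc)]
        rw [hitems]
        congr 1
        apply List.filter_congr
        intro x hx
        simp only [List.mem_filter, decide_eq_true_eq, not_and, not_not] at hc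
        by_cases hxa : x = A[k]
        · subst hxa
          have hxk : A[k] ∈ A.take k := hc hx
          simp [hmem_succ, hxk]
        · simp [hmem_succ, hxa]
    set L' := (PySem.List.pyRange 0 (mx + 2) 1).filter
        (fun x => decide (x ∉ A.take (k + 1))) with hL'def
    have hkeys' : (aState A mx n (k + 1)).1.keys = L' := by
      simp only [PySem.Dict.keys, hitems', List.map_map]
      simp [Function.comp_def]
    have hmem1 : mx + 1 ∈ L' := by
      rw [hL'def]
      refine List.mem_filter.mpr ⟨PySem.List.mem_pyRange_one.mpr ⟨by omega, by omega⟩, ?_⟩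
      rw [decide_eq_true_eq]
      intro hmem
      have := hmax _ (List.mem_of_mem_take hmem)
      omega
    have hpair : L'.Pairwise (· < ·) :=
      (PySem.List.pairwise_lt_pyRange_one 0 (mx + 2)).filter _
    rcases hL : L' with _ | ⟨hd, tl⟩
    · rw [hL] at hmem1; cases hmem1
    · rw [hL] at hpair
      have hlt := (List.pairwise_cons.mp hpair).1
      have hhd : hd ∈ L' := by rw [hL]; exact List.mem_cons_self
      have hhdR := (List.mem_filter.mp (hL'def ▸ hhd)).1
      have hhd2 : hd ∉ A.take (k + 1) := by
        have := (List.mem_filter.mp (hL'def ▸ hhd)).2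
        simpa using this
      have hhdb := PySem.List.mem_pyRange_one.mp hhdR
      have hdmex : IsMex (A.take (k + 1)) hd := by
        refine ⟨by omega, hhd2, fun j hj1 hj2 => ?_⟩
        by_contra hj
        have hjL : j ∈ L' := by
          rw [hL'def]
          exact List.mem_filter.mpr ⟨PySem.List.mem_pyRange_one.mpr ⟨hj1, by omega⟩, by simpa using hj⟩
        rw [hL] at hjL
        rcases List.mem_cons.mp hjL with h | h
        · omega
        · have := hlt j h; omega
      have hsnd : (aState A mx n (k + 1)).2 = (aState A mx n k).2.set k hd := by
        rw [aState_succ_snd, ← aState_succ_fst]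
        rw [hkeys', hL, PySem.List.pyGetD_of_nonneg _ _ (le_refl 0)]
        exact PySem.List.pySetD_natCast _ k hd
      refine ⟨by rw [hitems', hL], by rw [hsnd]; simp [hlen2], fun j hj => ?_⟩
      rw [hsnd]
      by_cases hjk : j < k
      · have : ((aState A mx n k).2.set k hd).getD j 0 = (aState A mx n k).2.getD j 0 := by
          rw [List.getD_eq_getElem?_getD, List.getD_eq_getElem?_getD,
            List.getElem?_set_ne (by omega)]
        rw [this]
        exact hmexs j hjk
      · obtain rfl : j = k := by omega
        have : ((aState A mx n j).2.set j hd).getD j 0 = hd := by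
          rw [List.getD_eq_getElem?_getD, List.getElem?_set_self (by omega)]
          rfl
        rw [this]
        exact hdmex

theorem IsMex_unique {P : List Int} {m m' : Int} (h : IsMex P m) (h' : IsMex P m') : m = m' := by
  rcases h with ⟨hm0, hmn, hml⟩
  rcases h' with ⟨hm0', hmn', hml'⟩
  rcases lt_trichotomy m m' with hlt | he | hgt
  · exact absurd (hml' m hm0 hlt) hmn
  · exact he
  · exact absurd (hml m' hm0' hgt) hmn'

theorem Prefix_Mex_eq (A : List Int) (n : Int)
    (hne : A ≠ []) (hlen : n ≤ (A.length : Int)) (hmx : 0 < n → ∃ x ∈ A, -1 ≤ x) :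
    Prefix_Mex A n = Prefix_Mex_alt A n := by
  rcases hA : PySem.List.max? A (fun x => x) with _ | mx
  · exact absurd ((PySem.List.max?_eq_none_iff A _).mp hA) hne
  · by_cases hn : n ≤ 0
    · have h0 : n.toNat = 0 := Int.toNat_of_nonpos hn
      rw [Prefix_Mex_eq_aState A n mx hA, alt_eq_bState, h0]
      simp [aState, bState, h0]
    · push_neg at hn
      rcases hmx hn with ⟨x, hxA, hx1⟩
      have hmax := PySem.List.max?_isMax hA
      have hmxb : -1 ≤ mx := le_trans hx1 (hmax x hxA)
      have hkn : ((n.toNat : Int)) ≤ n := by omega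
      rcases aState_inv A mx n hmxb hmax hlen n.toNat hkn with ⟨_, ha2, ha3⟩
      rcases bState_inv A n hlen n.toNat hkn with ⟨_, _, hb3, hb4⟩
      rw [Prefix_Mex_eq_aState A n mx hA, alt_eq_bState]
      apply List.ext_getElem (by rw [ha2, hb3])
      intro i h1 h2
      have hi : i < n.toNat := by rw [ha2] at h1; exact h1
      rw [← List.getD_eq_getElem _ 0 h1, ← List.getD_eq_getElem _ 0 h2]
      exact IsMex_unique (ha3 i hi) (hb4 i hi)

-- ===== VERDICT (by name: the statement is the Claim_ definition above) =====
theorem Prefix_Mex_spec : Claim_equal_Prefix_Mex := by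
  intro A n _ hpre
  unfold Spec_Prefix_Mex
  exact Prefix_Mex_eq A n hpre.1 hpre.2.1 hpre.2.2
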